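-- pv_equiv track=rewrite | github.com/alexdurand-scientist/Number-Guesser-Game | Number guesser.py | max_guess
-- ===== SOURCE A (Python) =====
-- def max_guess(low, high):
--     total_numbers = (high - low) + 1
--     total_guesses = 0
--     while (2**total_guesses) < total_numbers:
--         total_guesses += 1
--     print ("You have a total of %d guesses\n"
--            "in your range from %d to %d"
--            % (total_guesses, low, high))
--     return total_guesses
-- ===== SOURCE B (Python) =====
-- def max_guess(low, high):
--     total_numbers = (high - low) + 1
--     total_guesses = (total_numbers - 1).bit_length() if total_numbers >= 2 else 0
--     print ("You have a total of %d guesses\n"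
--            "in your range from %d to %d"
--            % (total_guesses, low, high))
--     return total_guesses
-- ===== Notes on version B (the rewrite author's own statement) =====
-- stated objective: simpler
-- what changed: Replaces the incremental doubling while-loop with a closed-form bit-length computation: (total_numbers-1).bit_length() for total_numbers >= 2, else 0.
import Mathlib
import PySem

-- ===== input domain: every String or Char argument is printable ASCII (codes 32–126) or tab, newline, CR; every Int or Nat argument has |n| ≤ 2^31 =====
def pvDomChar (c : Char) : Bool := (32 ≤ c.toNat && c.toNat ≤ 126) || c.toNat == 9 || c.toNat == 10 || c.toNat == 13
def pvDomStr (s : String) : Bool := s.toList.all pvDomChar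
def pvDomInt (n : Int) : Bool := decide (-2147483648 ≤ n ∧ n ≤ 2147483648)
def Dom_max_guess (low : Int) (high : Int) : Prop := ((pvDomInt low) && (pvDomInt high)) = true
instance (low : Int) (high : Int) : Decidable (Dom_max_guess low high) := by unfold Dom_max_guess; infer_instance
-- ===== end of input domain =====

-- B replaces A's incremental doubling loop by a closed-form bit-length formula (return value only; the print is identical in both Pythons and not modeled here).

-- ===== PORT A =====
-- the while-loop: keep incrementing g while 2**g < n; terminates because 2^g grows past n
def maxGuessLoop (n : Int) (g : Nat) : Int :=
  if (2 : Int) ^ g < n then maxGuessLoop n (g + 1) else (g : Int)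
termination_by (n - 2 ^ g).toNat
decreasing_by
  have h1 : (2 : Int) ^ g < 2 ^ (g + 1) := by
    have := pow_lt_pow_right₀ (a := (2 : Int)) (by norm_num) (Nat.lt_succ_self g)
    exact this
  omega

def max_guess (low : Int) (high : Int) : Int :=
  let total_numbers := (high - low) + 1
  maxGuessLoop total_numbers 0

-- ===== PORT B =====
-- (total_numbers - 1).bit_length() = Nat.size of the nonnegative value
def max_guess_alt (low : Int) (high : Int) : Int :=
  let total_numbers := (high - low) + 1
  if total_numbers ≥ 2 then (Nat.size (total_numbers - 1).toNat : Int) else 0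

-- ===== PRECONDITION & SPEC =====
def Spec_max_guess (low : Int) (high : Int) (out : Int) : Prop := out = max_guess_alt low high
instance (low : Int) (high : Int) (out : Int) : Decidable (Spec_max_guess low high out) := by unfold Spec_max_guess; infer_instance

-- ===== CLAIM (what is proved, stated in full; the proofs are below) =====
def Claim_equal_max_guess : Prop := ∀ (low : Int) (high : Int), Dom_max_guess low high → Spec_max_guess low high (max_guess low high)

-- ===== LEMMAS AND PROOFS =====

-- the loop, started at g, returns the least g' ≥ g with 2^g' ≥ n; for n ≥ 2 and g small enough
-- that least exponent is Nat.size (n-1).toNat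
theorem maxGuessLoop_eq (n : Int) (g : Nat) :
    maxGuessLoop n g = if (2 : Int) ^ g < n then (Nat.size (n - 1).toNat : Int) else (g : Int) := by
  induction g using maxGuessLoop.induct (n := n) with
  | case1 g hlt ih =>
    rw [maxGuessLoop, if_pos hlt, ih]
    have hn1 : 0 < n - 1 := by
      have : (1 : Int) ≤ 2 ^ g := one_le_pow₀ (by norm_num)
      omega
    have hlt' : (2 : Int) ^ g ≤ n - 1 := by omega
    have hsz : g < Nat.size (n - 1).toNat := by
      rw [Nat.lt_size]
      have : (2 : Int) ^ g = ((2 ^ g : Nat) : Int) := by push_cast; ring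
      omega
    split_ifs with h2
    · rfl
    · -- loop stopped at g+1: then size ≤ g+1, and size > g, so size = g+1
      have hle : Nat.size (n - 1).toNat ≤ g + 1 := by
        rw [Nat.size_le]
        have : (2 : Int) ^ (g + 1) = ((2 ^ (g + 1) : Nat) : Int) := by push_cast; ring
        omega
      have : Nat.size (n - 1).toNat = g + 1 := by omega
      rw [this]
  | case2 g hlt =>
    rw [maxGuessLoop, if_neg hlt, if_neg hlt]

theorem max_guess_spec : Claim_equal_max_guess := by
  intro low high _
  unfold Spec_max_guess max_guess max_guess_alt
  simp only
  set n := (high - low) + 1 with hn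
  rw [maxGuessLoop_eq]
  by_cases h : n ≥ 2
  · rw [if_pos (by norm_num; omega), if_pos h]
  · rw [if_neg (by norm_num; omega), if_neg h]
    rfl
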